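-- pv_equiv track=rewrite | github.com/ADiTyaRaj8969/StringMatching | 3. Finite Automata String Matching.py | compute_transition_function
-- ===== SOURCE A (Python) =====
-- NO_OF_CHARS = 256
--
-- def compute_transition_function(pattern):
--     m = len(pattern)
--     TF = [[0] * NO_OF_CHARS for _ in range(m + 1)]
--
--     for state in range(m + 1):
--         for x in range(NO_OF_CHARS):
--             next_state = 0
--             if state < m and x == ord(pattern[state]):
--                 next_state = state + 1
--             else:
--                 for ns in range(state, 0, -1):
--                     if ord(pattern[ns - 1]) == x:
--                         if pattern[:ns - 1] == pattern[state - ns + 1:state]: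
--                             next_state = ns
--                             break
--             TF[state][x] = next_state
--     return TF
-- ===== SOURCE B (Python) =====
-- NO_OF_CHARS = 256
--
-- def compute_transition_function(pattern):
--     # Simpler: each cell is just "the longest k with pattern[:k] a suffix of pattern[:state]+chr(x)",
--     # found by one forward scan of a single suffix test (no special-case branch, no two-part condition).
--     m = len(pattern)
--     table = []
--     for state in range(m + 1):
--         row = []
--         for x in range(NO_OF_CHARS):
--             s = pattern[:state] + chr(x)
--             best = 0
--             for k in range(1, min(state + 1, m) + 1):
--                 if pattern[:k] == s[len(s) - k:]:
--                     best = k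
--             row.append(best)
--         table.append(row)
--     return table
-- ===== Notes on version B (the rewrite author's own statement) =====
-- stated objective: simpler
-- what changed: Each cell is computed as the longest k with pattern[:k] a suffix of pattern[:state]+chr(x), by one forward scan of a single suffix test building rows by append, instead of A's zero-matrix fill with a special-case match branch plus a backward break-loop testing two separate slice/char conditions.
import Mathlib
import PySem

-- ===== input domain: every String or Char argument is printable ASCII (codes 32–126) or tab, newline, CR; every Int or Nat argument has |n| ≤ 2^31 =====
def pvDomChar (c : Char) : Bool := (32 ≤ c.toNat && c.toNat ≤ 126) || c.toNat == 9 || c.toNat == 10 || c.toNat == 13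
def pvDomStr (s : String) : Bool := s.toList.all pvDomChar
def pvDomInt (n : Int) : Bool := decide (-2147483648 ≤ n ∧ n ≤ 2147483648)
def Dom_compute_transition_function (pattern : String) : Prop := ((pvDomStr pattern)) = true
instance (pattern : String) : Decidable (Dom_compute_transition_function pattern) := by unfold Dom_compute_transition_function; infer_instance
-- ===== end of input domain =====

-- B computes each cell as the longest k with pattern[:k] a suffix of pattern[:state]+chr(x), by one
-- forward scan of a single suffix test (objective: simpler, same cost); A and B proved equal on Dom.


-- ===== PORT A =====
-- A's inner `for ns in range(state, 0, -1): … break`: first ns (from state down to 1) with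
-- ord(pattern[ns-1]) == x and pattern[:ns-1] == pattern[state-ns+1:state], else 0. Loop indices
-- state, x, ns are the Nats produced by range; every index/slice endpoint is nonnegative and in
-- range, so pattern[k] is getD, pattern[:k] is List.take k and pattern[a:state] is drop a of
-- take state (exact here).
def aFind (p : List Char) (state x : Nat) : Nat → Int
  | 0 => 0
  | ns + 1 =>
    if (p.getD ns ' ').toNat = x ∧ p.take ns = (p.take state).drop (state - ns)
    then ((ns : Int) + 1)
    else aFind p state x ns

-- A fills a zero matrix TF, assigning every cell TF[state][x] exactly once in loop order; the
-- port produces the same rows and cells in the same order.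
def compute_transition_function (pattern : String) : List (List Int) :=
  let p := pattern.toList
  let m := p.length
  (List.range (m + 1)).map (fun state =>
    (List.range 256).map (fun x =>
      if state < m ∧ x = (p.getD state ' ').toNat then ((state : Int) + 1)
      else aFind p state x state))

-- ===== PORT B =====
-- B's inner `for k in range(1, min(state+1, m)+1): if pattern[:k] == s[len(s)-k:]: best = k`
-- where s = pattern[:state] + chr(x); slices again have in-range nonnegative endpoints.
def altCell (p : List Char) (state x : Nat) : Int :=
  let s := p.take state ++ [Char.ofNat x]
  (List.range' 1 (min (state + 1) p.length)).foldl
    (fun best k => if p.take k = s.drop (s.length - k) then (k : Int) else best) 0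

def compute_transition_function_alt (pattern : String) : List (List Int) :=
  let p := pattern.toList
  let m := p.length
  (List.range (m + 1)).map (fun state =>
    (List.range 256).map (fun x => altCell p state x))

-- ===== PRECONDITION & SPEC =====
def Spec_compute_transition_function (pattern : String) (out : List (List Int)) : Prop := out = compute_transition_function_alt pattern
instance (pattern : String) (out : List (List Int)) : Decidable (Spec_compute_transition_function pattern out) := by unfold Spec_compute_transition_function; infer_instance

-- ===== CLAIM (what is proved, stated in full; the proofs are below) =====
def Claim_equal_compute_transition_function : Prop := ∀ (pattern : String), Dom_compute_transition_function pattern → Spec_compute_transition_function pattern (compute_transition_function pattern)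

-- ===== LEMMAS AND PROOFS =====

-- B's forward "keep the last k that matched" scan equals this downward "first k that matches" recursion.
def chase (cond : Nat → Prop) [DecidablePred cond] : Nat → Int
  | 0 => 0
  | k + 1 => if cond (k + 1) then ((k : Int) + 1) else chase cond k

theorem foldl_range'_eq_chase (cond : Nat → Prop) [DecidablePred cond] (K : Nat) :
    (List.range' 1 K).foldl (fun best k => if cond k then (k : Int) else best) 0 = chase cond K := by
  induction K with
  | zero => rfl
  | succ K ih =>
      rw [List.range'_1_concat, List.foldl_append, List.foldl_cons, List.foldl_nil, ih,
        Nat.add_comm 1 K]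
      rw [chase]
      split_ifs with h <;> push_cast <;> ring

theorem ofNat_eq_iff (c : Char) (x : Nat) (hx : x < 256) : (c = Char.ofNat x) ↔ c.toNat = x := by
  have hv : Nat.isValidChar x := Or.inl (by omega)
  constructor
  · rintro rfl; rw [Char.toNat_ofNat, if_pos hv]
  · rintro rfl; exact (Char.ofNat_toNat c).symm

-- A's two-part condition at ns+1 ⟺ B's single suffix test at k = ns+1 (for 1 ≤ ns+1 ≤ state ≤ m).
theorem cond_iff (p : List Char) (state x ns : Nat) (hx : x < 256)
    (hns : ns + 1 ≤ state) (hs : state ≤ p.length) :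
    ((p.getD ns ' ').toNat = x ∧ p.take ns = (p.take state).drop (state - ns)) ↔
      p.take (ns + 1) =
        (p.take state ++ [Char.ofNat x]).drop ((p.take state ++ [Char.ofNat x]).length - (ns + 1)) := by
  have hlt : (p.take state).length = state := by simp [Nat.min_eq_left hs]
  have hlen : (p.take state ++ [Char.ofNat x]).length - (ns + 1) = state - ns := by
    simp [hlt]
  rw [hlen, List.drop_append_of_le_length (by omega)]
  have hnsl : ns < p.length := by omega
  have htake : p.take (ns + 1) = p.take ns ++ [p.getD ns ' '] := by
    rw [List.take_add_one]
    congr 1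
    simp [List.getElem?_eq_getElem hnsl]
  rw [htake, List.append_singleton_inj, ofNat_eq_iff _ _ hx, and_comm]

theorem aFind_eq_chase (p : List Char) (state x ns : Nat) (hx : x < 256)
    (hns : ns ≤ state) (hs : state ≤ p.length) :
    aFind p state x ns =
      chase (fun k => p.take k =
        (p.take state ++ [Char.ofNat x]).drop ((p.take state ++ [Char.ofNat x]).length - k)) ns := by
  induction ns with
  | zero => rfl
  | succ ns ih =>
      rw [aFind, chase]
      rw [if_congr (cond_iff p state x ns hx hns hs) rfl (ih (by omega))]

theorem cell_eq (p : List Char) (state x : Nat) (hx : x < 256) (hs : state ≤ p.length) :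
    (if state < p.length ∧ x = (p.getD state ' ').toNat then ((state : Int) + 1)
     else aFind p state x state) = altCell p state x := by
  unfold altCell
  rw [foldl_range'_eq_chase]
  rcases Nat.lt_or_ge state p.length with hlt | hge
  · rw [Nat.min_eq_left (by omega)]
    rw [chase]
    have hcond : (p.take (state+1) =
        (p.take state ++ [Char.ofNat x]).drop ((p.take state ++ [Char.ofNat x]).length - (state+1)))
        ↔ (state < p.length ∧ x = (p.getD state ' ').toNat) := by
      have hlt' : (p.take state).length = state := by simp [Nat.min_eq_left hs]
      have hlen0 : (p.take state ++ [Char.ofNat x]).length - (state + 1) = 0 := by simp [hlt']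
      rw [hlen0, List.drop_zero]
      have htake : p.take (state + 1) = p.take state ++ [p.getD state ' '] := by
        rw [List.take_add_one]; congr 1; simp [List.getElem?_eq_getElem hlt]
      rw [htake, List.append_singleton_inj, ofNat_eq_iff _ _ hx]
      constructor
      · rintro ⟨-, h⟩; exact ⟨hlt, h.symm⟩
      · rintro ⟨-, h⟩; exact ⟨rfl, h.symm⟩
    rw [if_congr hcond.symm rfl rfl]
    split_ifs with h
    · rfl
    · exact aFind_eq_chase p state x state hx le_rfl hs
  · have hstate : state = p.length := le_antisymm hs hge
    rw [Nat.min_eq_right (by omega)]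
    rw [if_neg (by omega), ← hstate]
    exact aFind_eq_chase p state x state hx le_rfl hs

theorem compute_transition_function_eq (pattern : String) :
    compute_transition_function pattern = compute_transition_function_alt pattern := by
  unfold compute_transition_function compute_transition_function_alt
  apply List.map_congr_left
  intro state hstate
  apply List.map_congr_left
  intro x hxmem
  exact cell_eq _ state x (List.mem_range.mp hxmem) (by have := List.mem_range.mp hstate; omega)

-- ===== VERDICT (by name: the statement is the Claim_ definition above) =====
theorem compute_transition_function_spec : Claim_equal_compute_transition_function := by
  intro pattern _
  unfold Spec_compute_transition_function
  exact compute_transition_function_eq pattern
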